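-- pv_equiv track=rewrite | github.com/kunal123thakur/github_scrapper | agents/github_agent/github_analyzer.py | analyze_projects
-- ===== SOURCE A (Python) =====
-- def analyze_projects(repos):
--     difficulty = {"easy": 0, "medium": 0, "hard": 0}
--
--     for repo in repos:
--         size = repo.get("size", 0)
--         stars = repo.get("stargazers_count", 0)
--
--         if size < 500:
--             difficulty["easy"] += 1
--         elif size < 2000:
--             difficulty["medium"] += 1
--         else:
--             difficulty["hard"] += 1
--
--         if stars > 20:
--             difficulty["hard"] += 1
--
--     return difficulty
-- ===== SOURCE B (Python) =====
-- def analyze_projects(repos):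
--     repos = list(repos)
--     easy = sum(1 for r in repos if r.get("size", 0) < 500)
--     medium = sum(1 for r in repos if 500 <= r.get("size", 0) < 2000)
--     hard = sum(1 for r in repos if r.get("size", 0) >= 2000) \
--          + sum(1 for r in repos if r.get("stargazers_count", 0) > 20)
--     return {"easy": easy, "medium": medium, "hard": hard}
-- ===== Notes on version B (the rewrite author's own statement) =====
-- stated objective: idiomatic
-- what changed: Replaces the single accumulator loop over a mutable dict with four independent declarative 0/1-sum passes (one per category plus the stars bonus), building the result dict once at the end.
import Mathlib
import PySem

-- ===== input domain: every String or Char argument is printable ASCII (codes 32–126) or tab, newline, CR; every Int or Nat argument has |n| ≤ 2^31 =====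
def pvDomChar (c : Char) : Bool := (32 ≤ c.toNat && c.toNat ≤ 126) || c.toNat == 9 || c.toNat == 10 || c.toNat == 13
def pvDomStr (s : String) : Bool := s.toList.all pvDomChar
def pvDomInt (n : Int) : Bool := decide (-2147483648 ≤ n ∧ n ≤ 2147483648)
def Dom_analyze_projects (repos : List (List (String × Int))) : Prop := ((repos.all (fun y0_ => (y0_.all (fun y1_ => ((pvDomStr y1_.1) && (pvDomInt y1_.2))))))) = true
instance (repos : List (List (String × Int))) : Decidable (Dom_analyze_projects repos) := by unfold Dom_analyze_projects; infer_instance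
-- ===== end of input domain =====

-- B replaces A's single accumulator loop over a mutable dict with independent declarative 0/1-sum passes (one per category), same O(n) cost.

-- repo.get(k, 0): first-match lookup in the association list (Python dict has unique keys; first match = the lookup)
def repoGetD (r : List (String × Int)) (k : String) (dflt : Int) : Int :=
  match r.find? (fun p => p.1 == k) with
  | some p => p.2
  | none => dflt

-- ===== PORT A =====
def analyze_projects (repos : List (List (String × Int))) : List (String × Int) :=
  let d0 : PySem.Dict String Int :=
    PySem.Dict.mk [("easy", 0), ("medium", 0), ("hard", 0)]
  let d := repos.foldl (fun d repo =>
    let size := repoGetD repo "size" 0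
    let stars := repoGetD repo "stargazers_count" 0
    let d :=
      if size < 500 then d.modify "easy" 0 (· + 1)
      else if size < 2000 then d.modify "medium" 0 (· + 1)
      else d.modify "hard" 0 (· + 1)
    if stars > 20 then d.modify "hard" 0 (· + 1) else d) d0
  d.items

-- ===== PORT B =====
def analyze_projects_alt (repos : List (List (String × Int))) : List (String × Int) :=
  let easy := ((repos.filter (fun r => repoGetD r "size" 0 < 500)).map (fun _ => (1 : Int))).sum
  let medium := ((repos.filter (fun r => 500 ≤ repoGetD r "size" 0 ∧ repoGetD r "size" 0 < 2000)).map (fun _ => (1 : Int))).sum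
  let hard := ((repos.filter (fun r => repoGetD r "size" 0 ≥ 2000)).map (fun _ => (1 : Int))).sum
            + ((repos.filter (fun r => repoGetD r "stargazers_count" 0 > 20)).map (fun _ => (1 : Int))).sum
  [("easy", easy), ("medium", medium), ("hard", hard)]

-- ===== PRECONDITION & SPEC =====
def Spec_analyze_projects (repos : List (List (String × Int))) (out : List (String × Int)) : Prop := out = analyze_projects_alt repos
instance (repos : List (List (String × Int))) (out : List (String × Int)) : Decidable (Spec_analyze_projects repos out) := by unfold Spec_analyze_projects; infer_instance

-- ===== CLAIM (what is proved, stated in full; the proofs are below) =====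
def Claim_equal_analyze_projects : Prop := ∀ (repos : List (List (String × Int))), Dom_analyze_projects repos → Spec_analyze_projects repos (analyze_projects repos)

-- ===== LEMMAS AND PROOFS =====

lemma cnt_cons (p : List (String × Int) → Prop) [DecidablePred p] (r : List (String × Int)) (rs : List (List (String × Int))) :
    (((r :: rs).filter (fun x => p x)).map (fun _ => (1 : Int))).sum
      = (if p r then 1 else 0) + ((rs.filter (fun x => p x)).map (fun _ => (1 : Int))).sum := by
  by_cases h : p r <;> simp [h]

lemma modify_easy (a b c : Int) : (PySem.Dict.mk [("easy",a),("medium",b),("hard",c)]).modify "easy" 0 (· + 1) = PySem.Dict.mk [("easy",a+1),("medium",b),("hard",c)] := rfl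
lemma modify_medium (a b c : Int) : (PySem.Dict.mk [("easy",a),("medium",b),("hard",c)]).modify "medium" 0 (· + 1) = PySem.Dict.mk [("easy",a),("medium",b+1),("hard",c)] := rfl
lemma modify_hard (a b c : Int) : (PySem.Dict.mk [("easy",a),("medium",b),("hard",c)]).modify "hard" 0 (· + 1) = PySem.Dict.mk [("easy",a),("medium",b),("hard",c+1)] := rfl

lemma loop_invariant (repos : List (List (String × Int))) (a b c : Int) :
    (repos.foldl (fun d repo =>
      let size := repoGetD repo "size" 0
      let stars := repoGetD repo "stargazers_count" 0
      let d :=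
        if size < 500 then d.modify "easy" 0 (· + 1)
        else if size < 2000 then d.modify "medium" 0 (· + 1)
        else d.modify "hard" 0 (· + 1)
      if stars > 20 then d.modify "hard" 0 (· + 1) else d)
      (PySem.Dict.mk [("easy", a), ("medium", b), ("hard", c)])).items
    = [("easy", a + ((repos.filter (fun r => repoGetD r "size" 0 < 500)).map (fun _ => (1 : Int))).sum),
       ("medium", b + ((repos.filter (fun r => 500 ≤ repoGetD r "size" 0 ∧ repoGetD r "size" 0 < 2000)).map (fun _ => (1 : Int))).sum),
       ("hard", c + ((repos.filter (fun r => repoGetD r "size" 0 ≥ 2000)).map (fun _ => (1 : Int))).sum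
                  + ((repos.filter (fun r => repoGetD r "stargazers_count" 0 > 20)).map (fun _ => (1 : Int))).sum)] := by
  induction repos generalizing a b c with
  | nil => simp
  | cons r rs ih =>
    simp only [List.foldl_cons]
    rw [cnt_cons (fun x => repoGetD x "size" 0 < 500),
        cnt_cons (fun x => 500 ≤ repoGetD x "size" 0 ∧ repoGetD x "size" 0 < 2000),
        cnt_cons (fun x => repoGetD x "size" 0 ≥ 2000),
        cnt_cons (fun x => repoGetD x "stargazers_count" 0 > 20)]
    by_cases h1 : repoGetD r "size" 0 < 500 <;>
      by_cases h2 : repoGetD r "size" 0 < 2000 <;>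
      by_cases h3 : repoGetD r "stargazers_count" 0 > 20 <;>
      simp only [h1, h2, h3, if_true, if_false,
        modify_easy, modify_medium, modify_hard, ih] <;>
      simp_all <;> omega

theorem analyze_projects_spec : Claim_equal_analyze_projects := by
  intro repos _
  show analyze_projects repos = analyze_projects_alt repos
  simp only [analyze_projects, analyze_projects_alt]
  rw [loop_invariant]
  simp
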